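-- pv_equiv track=rewrite | github.com/Ivarhem/pjtmgr | scripts/catalog_vendor_rules.py | is_preferred_lifecycle_url
-- ===== SOURCE A (Python) =====
-- def normalize_vendor(vendor: str) -> str:
--     return " ".join((vendor or "").strip().lower().split())
--
-- def is_bad_spec_fallback(url: str) -> bool:
--     value = (url or '').lower()
--     return any(token in value for token in ['end-of-sale', 'end_of_sale', 'eol', 'eosl', 'lifecycle', '/support/', '/techdocs/', 'guide', 'manual', 'help.', 'centralon-prem'])
--
-- def is_preferred_lifecycle_url(vendor: str, url: str) -> bool:
--     value = (url or '').lower()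
--     key = normalize_vendor(vendor)
--     if not value:
--         return False
--     # generic bad lifecycle candidates
--     if any(token in value for token in ['/attachments/', '/download/', '.pdf']) and not any(token in value for token in ['end-of-sale', 'end-of-life', 'end of support', 'lifecycle']):
--         return False
--     if key == 'cisco':
--         return any(token in value for token in ['/support/', 'end-of-sale', 'field-notice', 'bulletin']) and '/collateral/' not in value
--     if key == 'juniper':
--         return any(token in value for token in ['end-of-life', 'end of life', 'lifecycle', '/support/']) and '/specs' not in value
--     if key == 'fortinet':
--         return ('fortiguard' in value or '/support/' in value or 'end-of-support' in value or 'product-life-cycle' in value or 'lifecycle' in value) and '/attachments/' not in value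
--     if key == 'dell':
--         return (any(token in value for token in ['lifecycle', 'end-of-life']) or '/support/product-details/' in value) and 'spec-sheet' not in value and '/drivers' not in value
--     if key == 'f5':
--         return any(token in value for token in ['end-of-support', 'end of support', 'lifecycle', '/support/']) and '/products/' not in value
--     if key == 'palo alto networks':
--         return any(token in value for token in ['end-of-life', 'end of life', 'lifecycle']) and '/resources/datasheets/' not in value and '/hardware/' not in value
--     if key == 'monitorapp':
--         return '/support' in value and 'monitorapp.com' in value
--     return is_bad_spec_fallback(url)
-- ===== SOURCE B (Python) =====
-- def normalize_vendor(vendor: str) -> str: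
--     return " ".join((vendor or "").strip().lower().split())
--
-- # Rules are small expression trees evaluated by one recursive interpreter:
-- # ('tok', t) | ('any', [t..]) | ('all', [t..]) | ('not', e) | ('and', e1, e2) | ('or', e1, e2)
-- _GENERIC_BAD = ('and', ('any', ['/attachments/', '/download/', '.pdf']),
--                        ('not', ('any', ['end-of-sale', 'end-of-life', 'end of support', 'lifecycle'])))
--
-- _RULES = {
--     'cisco': ('and', ('any', ['/support/', 'end-of-sale', 'field-notice', 'bulletin']),
--                      ('not', ('tok', '/collateral/'))),
--     'juniper': ('and', ('any', ['end-of-life', 'end of life', 'lifecycle', '/support/']),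
--                        ('not', ('tok', '/specs'))),
--     'fortinet': ('and', ('any', ['fortiguard', '/support/', 'end-of-support', 'product-life-cycle', 'lifecycle']),
--                         ('not', ('tok', '/attachments/'))),
--     'dell': ('and', ('or', ('any', ['lifecycle', 'end-of-life']), ('tok', '/support/product-details/')),
--                     ('and', ('not', ('tok', 'spec-sheet')), ('not', ('tok', '/drivers')))),
--     'f5': ('and', ('any', ['end-of-support', 'end of support', 'lifecycle', '/support/']),
--                   ('not', ('tok', '/products/'))),
--     'palo alto networks': ('and', ('any', ['end-of-life', 'end of life', 'lifecycle']),
--                                   ('and', ('not', ('tok', '/resources/datasheets/')), ('not', ('tok', '/hardware/')))),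
--     'monitorapp': ('all', ['/support', 'monitorapp.com']),
-- }
--
-- _FALLBACK = ('any', ['end-of-sale', 'end_of_sale', 'eol', 'eosl', 'lifecycle', '/support/',
--                      '/techdocs/', 'guide', 'manual', 'help.', 'centralon-prem'])
--
-- def _collect_tokens(e, acc):
--     op = e[0]
--     if op == 'tok':
--         acc.append(e[1])
--     elif op in ('any', 'all'):
--         acc.extend(e[1])
--     elif op == 'not':
--         _collect_tokens(e[1], acc)
--     else:
--         _collect_tokens(e[1], acc)
--         _collect_tokens(e[2], acc)
--
-- _ALL_TOKENS = []
-- for _e in [_GENERIC_BAD, _FALLBACK] + list(_RULES.values()):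
--     _collect_tokens(_e, _ALL_TOKENS)
--
-- def _eval(e, matched):
--     op = e[0]
--     if op == 'tok':
--         return e[1] in matched
--     if op == 'any':
--         return any(t in matched for t in e[1])
--     if op == 'all':
--         return all(t in matched for t in e[1])
--     if op == 'not':
--         return not _eval(e[1], matched)
--     if op == 'and':
--         return _eval(e[1], matched) and _eval(e[2], matched)
--     return _eval(e[1], matched) or _eval(e[2], matched)
--
-- def is_preferred_lifecycle_url(vendor: str, url: str) -> bool:
--     value = (url or '').lower()
--     if not value:
--         return False
--     # one scan of the url per distinct token, collected once into a match index
--     matched = [t for t in _ALL_TOKENS if t in value]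
--     if _eval(_GENERIC_BAD, matched):
--         return False
--     return _eval(_RULES.get(normalize_vendor(vendor), _FALLBACK), matched)
-- ===== Notes on version B (the rewrite author's own statement) =====
-- stated objective: alternative
-- what changed: The if/elif chain of inline any/not-any substring tests is replaced by rules represented as small boolean expression trees, a match index (the list of tokens occurring in the url) built in one pass up front, and a single recursive interpreter evaluating the looked-up tree against that index.
import Mathlib
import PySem

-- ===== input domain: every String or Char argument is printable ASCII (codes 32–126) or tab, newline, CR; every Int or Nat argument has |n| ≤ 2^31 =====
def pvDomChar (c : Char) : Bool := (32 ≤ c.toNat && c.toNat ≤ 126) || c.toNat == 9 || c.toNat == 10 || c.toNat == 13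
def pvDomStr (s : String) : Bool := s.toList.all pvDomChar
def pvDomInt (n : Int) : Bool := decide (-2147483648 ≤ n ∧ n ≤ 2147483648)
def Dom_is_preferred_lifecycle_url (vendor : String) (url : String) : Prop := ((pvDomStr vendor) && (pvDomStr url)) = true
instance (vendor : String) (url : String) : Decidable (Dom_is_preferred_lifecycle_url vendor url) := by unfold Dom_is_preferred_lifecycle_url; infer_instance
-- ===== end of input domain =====

-- B replaces the per-vendor if/elif chain of inline substring tests by rule expression trees,
-- a token-match index built once, and one recursive interpreter (alternative decomposition).

set_option maxRecDepth 8192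

-- ===== PORT A =====
def pvNormalizeVendor (vendor : String) : String :=
  PySem.Str.join " " (PySem.Str.split₀ (PySem.Str.lower (PySem.Str.strip vendor)))

def pvIsBadSpecFallback (url : String) : Bool :=
  let value := PySem.Str.lower url
  ["end-of-sale", "end_of_sale", "eol", "eosl", "lifecycle", "/support/", "/techdocs/",
   "guide", "manual", "help.", "centralon-prem"].any (fun t => PySem.Str.isIn t value)

def is_preferred_lifecycle_url (vendor : String) (url : String) : Bool :=
  let value := PySem.Str.lower url
  let key := pvNormalizeVendor vendor
  if value == "" then false
  else if (["/attachments/", "/download/", ".pdf"].any (fun t => PySem.Str.isIn t value)) &&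
          !(["end-of-sale", "end-of-life", "end of support", "lifecycle"].any (fun t => PySem.Str.isIn t value)) then false
  else if key == "cisco" then
    (["/support/", "end-of-sale", "field-notice", "bulletin"].any (fun t => PySem.Str.isIn t value)) &&
      !(PySem.Str.isIn "/collateral/" value)
  else if key == "juniper" then
    (["end-of-life", "end of life", "lifecycle", "/support/"].any (fun t => PySem.Str.isIn t value)) &&
      !(PySem.Str.isIn "/specs" value)
  else if key == "fortinet" then
    (PySem.Str.isIn "fortiguard" value || PySem.Str.isIn "/support/" value ||
     PySem.Str.isIn "end-of-support" value || PySem.Str.isIn "product-life-cycle" value ||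
     PySem.Str.isIn "lifecycle" value) && !(PySem.Str.isIn "/attachments/" value)
  else if key == "dell" then
    ((["lifecycle", "end-of-life"].any (fun t => PySem.Str.isIn t value)) ||
      PySem.Str.isIn "/support/product-details/" value) &&
      !(PySem.Str.isIn "spec-sheet" value) && !(PySem.Str.isIn "/drivers" value)
  else if key == "f5" then
    (["end-of-support", "end of support", "lifecycle", "/support/"].any (fun t => PySem.Str.isIn t value)) &&
      !(PySem.Str.isIn "/products/" value)
  else if key == "palo alto networks" then
    (["end-of-life", "end of life", "lifecycle"].any (fun t => PySem.Str.isIn t value)) &&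
      !(PySem.Str.isIn "/resources/datasheets/" value) && !(PySem.Str.isIn "/hardware/" value)
  else if key == "monitorapp" then
    PySem.Str.isIn "/support" value && PySem.Str.isIn "monitorapp.com" value
  else pvIsBadSpecFallback url

-- ===== PORT B =====
inductive PvExpr where
  | tok : String → PvExpr
  | anyOf : List String → PvExpr
  | allOf : List String → PvExpr
  | noT : PvExpr → PvExpr
  | anD : PvExpr → PvExpr → PvExpr
  | oR : PvExpr → PvExpr → PvExpr
deriving DecidableEq, Repr

def pvGenericBad : PvExpr :=
  .anD (.anyOf ["/attachments/", "/download/", ".pdf"])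
       (.noT (.anyOf ["end-of-sale", "end-of-life", "end of support", "lifecycle"]))

def pvRules : PySem.Dict String PvExpr :=
  PySem.Dict.ofList
    [("cisco", .anD (.anyOf ["/support/", "end-of-sale", "field-notice", "bulletin"]) (.noT (.tok "/collateral/"))),
     ("juniper", .anD (.anyOf ["end-of-life", "end of life", "lifecycle", "/support/"]) (.noT (.tok "/specs"))),
     ("fortinet", .anD (.anyOf ["fortiguard", "/support/", "end-of-support", "product-life-cycle", "lifecycle"]) (.noT (.tok "/attachments/"))),
     ("dell", .anD (.oR (.anyOf ["lifecycle", "end-of-life"]) (.tok "/support/product-details/"))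
                   (.anD (.noT (.tok "spec-sheet")) (.noT (.tok "/drivers")))),
     ("f5", .anD (.anyOf ["end-of-support", "end of support", "lifecycle", "/support/"]) (.noT (.tok "/products/"))),
     ("palo alto networks", .anD (.anyOf ["end-of-life", "end of life", "lifecycle"])
                                 (.anD (.noT (.tok "/resources/datasheets/")) (.noT (.tok "/hardware/")))),
     ("monitorapp", .allOf ["/support", "monitorapp.com"])]

def pvFallback : PvExpr :=
  .anyOf ["end-of-sale", "end_of_sale", "eol", "eosl", "lifecycle", "/support/",
          "/techdocs/", "guide", "manual", "help.", "centralon-prem"]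

-- port of _collect_tokens (accumulator-appending recursion, same order)
def pvCollectTokens : PvExpr → List String → List String
  | .tok t, acc => acc ++ [t]
  | .anyOf ts, acc => acc ++ ts
  | .allOf ts, acc => acc ++ ts
  | .noT e, acc => pvCollectTokens e acc
  | .anD e1 e2, acc => pvCollectTokens e2 (pvCollectTokens e1 acc)
  | .oR e1 e2, acc => pvCollectTokens e2 (pvCollectTokens e1 acc)

def pvAllTokens : List String :=
  ([pvGenericBad, pvFallback] ++ pvRules.values).foldl (fun acc e => pvCollectTokens e acc) []

def pvEval : PvExpr → List String → Bool
  | .tok t, m => m.contains t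
  | .anyOf ts, m => ts.any (fun t => m.contains t)
  | .allOf ts, m => ts.all (fun t => m.contains t)
  | .noT e, m => !(pvEval e m)
  | .anD e1 e2, m => pvEval e1 m && pvEval e2 m
  | .oR e1 e2, m => pvEval e1 m || pvEval e2 m

def is_preferred_lifecycle_url_alt (vendor : String) (url : String) : Bool :=
  let value := PySem.Str.lower url
  if value == "" then false
  else
    let matched := pvAllTokens.filter (fun t => PySem.Str.isIn t value)
    if pvEval pvGenericBad matched then false
    else pvEval ((pvRules.get? (pvNormalizeVendor vendor)).getD pvFallback) matched

-- ===== PRECONDITION & SPEC =====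
def Spec_is_preferred_lifecycle_url (vendor : String) (url : String) (out : Bool) : Prop := out = is_preferred_lifecycle_url_alt vendor url
instance (vendor : String) (url : String) (out : Bool) : Decidable (Spec_is_preferred_lifecycle_url vendor url out) := by unfold Spec_is_preferred_lifecycle_url; infer_instance

-- ===== CLAIM =====
def Claim_equal_is_preferred_lifecycle_url : Prop := ∀ (vendor : String) (url : String), Dom_is_preferred_lifecycle_url vendor url → Spec_is_preferred_lifecycle_url vendor url (is_preferred_lifecycle_url vendor url)

-- ===== LEMMAS AND PROOFS =====
-- proof-only denotation: what pvEval computes when the match index is faithful to `value`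
def pvDenote : PvExpr → String → Bool
  | .tok t, value => PySem.Str.isIn t value
  | .anyOf ts, value => ts.any (fun t => PySem.Str.isIn t value)
  | .allOf ts, value => ts.all (fun t => PySem.Str.isIn t value)
  | .noT e, value => !(pvDenote e value)
  | .anD e1 e2, value => pvDenote e1 value && pvDenote e2 value
  | .oR e1 e2, value => pvDenote e1 value || pvDenote e2 value

theorem pvCollect_append (e : PvExpr) (acc : List String) :
    pvCollectTokens e acc = acc ++ pvCollectTokens e [] := by
  induction e generalizing acc with
  | tok t => simp [pvCollectTokens]
  | anyOf ts => simp [pvCollectTokens]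
  | allOf ts => simp [pvCollectTokens]
  | noT e ih => simp only [pvCollectTokens]; exact ih acc
  | anD e1 e2 ih1 ih2 =>
      simp only [pvCollectTokens]
      rw [ih2, ih2 (pvCollectTokens e1 []), ih1, List.append_assoc]
  | oR e1 e2 ih1 ih2 =>
      simp only [pvCollectTokens]
      rw [ih2, ih2 (pvCollectTokens e1 []), ih1, List.append_assoc]

theorem pvAny_congr (l : List String) (p q : String → Bool) (h : ∀ x ∈ l, p x = q x) :
    l.any p = l.any q := by
  induction l with
  | nil => rfl
  | cons a t ih => simp only [List.any_cons, h a (by simp), ih (fun x hx => h x (by simp [hx]))]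

theorem pvAll_congr (l : List String) (p q : String → Bool) (h : ∀ x ∈ l, p x = q x) :
    l.all p = l.all q := by
  induction l with
  | nil => rfl
  | cons a t ih => simp only [List.all_cons, h a (by simp), ih (fun x hx => h x (by simp [hx]))]

theorem pvContains_filter (l : List String) (p : String → Bool) (t : String) (h : t ∈ l) :
    ((l.filter p).contains t) = p t := by
  cases hpt : p t
  · simp [List.mem_filter, hpt]
  · simp [List.mem_filter, hpt, h]

theorem pvEval_filter (value : String) (e : PvExpr)
    (h : ∀ t ∈ pvCollectTokens e [], t ∈ pvAllTokens) :
    pvEval e (pvAllTokens.filter (fun s => PySem.Str.isIn s value)) = pvDenote e value := by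
  induction e with
  | tok t =>
      simp only [pvEval, pvDenote]
      exact pvContains_filter _ _ _ (h t (by simp [pvCollectTokens]))
  | anyOf ts =>
      simp only [pvEval, pvDenote]
      refine pvAny_congr _ _ _ (fun t ht => ?_)
      exact pvContains_filter _ _ _ (h t (by simpa [pvCollectTokens] using ht))
  | allOf ts =>
      simp only [pvEval, pvDenote]
      refine pvAll_congr _ _ _ (fun t ht => ?_)
      exact pvContains_filter _ _ _ (h t (by simpa [pvCollectTokens] using ht))
  | noT e ih =>
      simp only [pvEval, pvDenote]
      rw [ih h]
  | anD e1 e2 ih1 ih2 =>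
      simp only [pvEval, pvDenote, pvCollectTokens] at *
      rw [pvCollect_append e2 (pvCollectTokens e1 [])] at h
      simp only [List.mem_append] at h
      rw [ih1 (fun t ht => h t (Or.inl ht)), ih2 (fun t ht => h t (Or.inr ht))]
  | oR e1 e2 ih1 ih2 =>
      simp only [pvEval, pvDenote, pvCollectTokens] at *
      rw [pvCollect_append e2 (pvCollectTokens e1 [])] at h
      simp only [List.mem_append] at h
      rw [ih1 (fun t ht => h t (Or.inl ht)), ih2 (fun t ht => h t (Or.inr ht))]

theorem pvRules_get? (key : String) : pvRules.get? key =
    if key = "cisco" then some (.anD (.anyOf ["/support/", "end-of-sale", "field-notice", "bulletin"]) (.noT (.tok "/collateral/")))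
    else if key = "juniper" then some (.anD (.anyOf ["end-of-life", "end of life", "lifecycle", "/support/"]) (.noT (.tok "/specs")))
    else if key = "fortinet" then some (.anD (.anyOf ["fortiguard", "/support/", "end-of-support", "product-life-cycle", "lifecycle"]) (.noT (.tok "/attachments/")))
    else if key = "dell" then some (.anD (.oR (.anyOf ["lifecycle", "end-of-life"]) (.tok "/support/product-details/")) (.anD (.noT (.tok "spec-sheet")) (.noT (.tok "/drivers"))))
    else if key = "f5" then some (.anD (.anyOf ["end-of-support", "end of support", "lifecycle", "/support/"]) (.noT (.tok "/products/")))
    else if key = "palo alto networks" then some (.anD (.anyOf ["end-of-life", "end of life", "lifecycle"]) (.anD (.noT (.tok "/resources/datasheets/")) (.noT (.tok "/hardware/"))))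
    else if key = "monitorapp" then some (.allOf ["/support", "monitorapp.com"])
    else none := by
  have h : pvRules = PySem.Dict.mk
    [("cisco", .anD (.anyOf ["/support/", "end-of-sale", "field-notice", "bulletin"]) (.noT (.tok "/collateral/"))),
     ("juniper", .anD (.anyOf ["end-of-life", "end of life", "lifecycle", "/support/"]) (.noT (.tok "/specs"))),
     ("fortinet", .anD (.anyOf ["fortiguard", "/support/", "end-of-support", "product-life-cycle", "lifecycle"]) (.noT (.tok "/attachments/"))),
     ("dell", .anD (.oR (.anyOf ["lifecycle", "end-of-life"]) (.tok "/support/product-details/"))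
                   (.anD (.noT (.tok "spec-sheet")) (.noT (.tok "/drivers")))),
     ("f5", .anD (.anyOf ["end-of-support", "end of support", "lifecycle", "/support/"]) (.noT (.tok "/products/"))),
     ("palo alto networks", .anD (.anyOf ["end-of-life", "end of life", "lifecycle"])
                                 (.anD (.noT (.tok "/resources/datasheets/")) (.noT (.tok "/hardware/")))),
     ("monitorapp", .allOf ["/support", "monitorapp.com"])] := by decide
  rw [h, PySem.Dict.get?_mk_cons, PySem.Dict.get?_mk_cons, PySem.Dict.get?_mk_cons,
      PySem.Dict.get?_mk_cons, PySem.Dict.get?_mk_cons, PySem.Dict.get?_mk_cons,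
      PySem.Dict.get?_mk_cons]
  simp only [beq_iff_eq]
  by_cases h1 : key = "cisco" <;> by_cases h2 : key = "juniper" <;>
  by_cases h3 : key = "fortinet" <;> by_cases h4 : key = "dell" <;>
  by_cases h5 : key = "f5" <;> by_cases h6 : key = "palo alto networks" <;>
  by_cases h7 : key = "monitorapp" <;> simp_all [eq_comm, PySem.Dict.get?]

-- ===== VERDICT =====
theorem is_preferred_lifecycle_url_spec : Claim_equal_is_preferred_lifecycle_url := by
  intro vendor url _
  unfold Spec_is_preferred_lifecycle_url
  simp only [is_preferred_lifecycle_url, is_preferred_lifecycle_url_alt, pvRules_get?]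
  generalize pvNormalizeVendor vendor = key
  have hg := pvEval_filter (PySem.Str.lower url) pvGenericBad (by decide)
  have hf := pvEval_filter (PySem.Str.lower url) pvFallback (by decide)
  have hc := pvEval_filter (PySem.Str.lower url) (.anD (.anyOf ["/support/", "end-of-sale", "field-notice", "bulletin"]) (.noT (.tok "/collateral/"))) (by decide)
  have hj := pvEval_filter (PySem.Str.lower url) (.anD (.anyOf ["end-of-life", "end of life", "lifecycle", "/support/"]) (.noT (.tok "/specs"))) (by decide)
  have hft := pvEval_filter (PySem.Str.lower url) (.anD (.anyOf ["fortiguard", "/support/", "end-of-support", "product-life-cycle", "lifecycle"]) (.noT (.tok "/attachments/"))) (by decide)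
  have hd := pvEval_filter (PySem.Str.lower url) (.anD (.oR (.anyOf ["lifecycle", "end-of-life"]) (.tok "/support/product-details/")) (.anD (.noT (.tok "spec-sheet")) (.noT (.tok "/drivers")))) (by decide)
  have h5 := pvEval_filter (PySem.Str.lower url) (.anD (.anyOf ["end-of-support", "end of support", "lifecycle", "/support/"]) (.noT (.tok "/products/"))) (by decide)
  have hp := pvEval_filter (PySem.Str.lower url) (.anD (.anyOf ["end-of-life", "end of life", "lifecycle"]) (.anD (.noT (.tok "/resources/datasheets/")) (.noT (.tok "/hardware/")))) (by decide)
  have hm := pvEval_filter (PySem.Str.lower url) (.allOf ["/support", "monitorapp.com"]) (by decide)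
  by_cases k1 : key = "cisco" <;> by_cases k2 : key = "juniper" <;>
  by_cases k3 : key = "fortinet" <;> by_cases k4 : key = "dell" <;>
  by_cases k5 : key = "f5" <;> by_cases k6 : key = "palo alto networks" <;>
  by_cases k7 : key = "monitorapp" <;>
  simp_all [pvDenote, pvIsBadSpecFallback, pvFallback, pvGenericBad, List.any, List.all,
            Bool.or_assoc, Bool.and_assoc]
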